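-- pv_equiv track=rewrite | github.com/Pierlou/dashboard-datagouv-monitoring | dashboard-monitor.py | get_latest_day_of_each_month
-- ===== SOURCE A (Python) =====
-- def get_latest_day_of_each_month(days_list):
--     last_days = {}
--     for day in sorted(days_list):
--         month = day[:7]
--         if month not in last_days:
--             last_days[month] = day
--         elif last_days[month] < day:
--             last_days[month] = day
--     return last_days
-- ===== SOURCE B (Python) =====
-- def get_latest_day_of_each_month(days_list):
--     # Sort once; months are string prefixes, so each month's days form a
--     # contiguous run in the sorted list. Emit the last element of every run.
--     result = {}
--     prev = None
--     for day in sorted(days_list):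
--         if prev is not None and prev[:7] != day[:7]:
--             result[prev[:7]] = prev
--         prev = day
--     if prev is not None:
--         result[prev[:7]] = prev
--     return result
-- ===== Notes on version B (the rewrite author's own statement) =====
-- stated objective: alternative
-- what changed: B replaces A's dict of running per-month maxima (membership test + compare-and-overwrite on every element) with a run-boundary scan: since a month is a prefix of its days, sorting makes each month's days contiguous, so B just emits the element standing at the end of each month run, with no lookups or overwrites at all.
import Mathlib
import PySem

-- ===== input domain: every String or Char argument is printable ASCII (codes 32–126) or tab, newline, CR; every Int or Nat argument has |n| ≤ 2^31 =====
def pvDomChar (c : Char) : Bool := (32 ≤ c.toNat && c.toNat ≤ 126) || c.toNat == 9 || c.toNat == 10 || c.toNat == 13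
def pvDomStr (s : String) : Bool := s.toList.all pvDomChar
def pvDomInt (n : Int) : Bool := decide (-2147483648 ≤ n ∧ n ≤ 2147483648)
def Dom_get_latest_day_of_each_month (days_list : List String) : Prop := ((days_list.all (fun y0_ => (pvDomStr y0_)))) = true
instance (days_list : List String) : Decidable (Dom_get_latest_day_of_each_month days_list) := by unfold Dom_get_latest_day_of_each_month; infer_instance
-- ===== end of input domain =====

-- B replaces A's dict of running per-month maxima with a run-boundary scan over the sorted list:
-- months are prefixes of their days, so sorting makes each month's days contiguous and B emits
-- the last element of each run, with no lookups or overwrites (alternative decomposition, same cost).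

-- shared helper: day[:7]
def pvMonth (day : String) : String := PySem.Str.slice day none (some 7)

-- ===== PORT A =====
-- loop body of A: dict update keeping the larger day for the month
def pvLoopA (last_days : PySem.Dict String String) (day : String) : PySem.Dict String String :=
  match last_days.get? (pvMonth day) with
  | none => last_days.insert (pvMonth day) day
  | some v => if v < day then last_days.insert (pvMonth day) day else last_days

def get_latest_day_of_each_month (days_list : List String) : List (String × String) :=
  ((PySem.List.sorted days_list (fun x => x)).foldl pvLoopA PySem.Dict.empty).items

-- ===== PORT B =====
-- loop body of B: 'if prev is not None and prev[:7] != day[:7]: result[prev[:7]] = prev; prev = day'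
def pvLoopB (st : PySem.Dict String String × Option String) (day : String) :
    PySem.Dict String String × Option String :=
  match st.2 with
  | some p => if pvMonth p ≠ pvMonth day then (st.1.insert (pvMonth p) p, some day) else (st.1, some day)
  | none => (st.1, some day)

-- final 'if prev is not None: result[prev[:7]] = prev'
def pvFinishB (st : PySem.Dict String String × Option String) : PySem.Dict String String :=
  match st.2 with
  | some p => st.1.insert (pvMonth p) p
  | none => st.1

def get_latest_day_of_each_month_alt (days_list : List String) : List (String × String) :=
  (pvFinishB ((PySem.List.sorted days_list (fun x => x)).foldl pvLoopB (PySem.Dict.empty, none))).items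

-- ===== PRECONDITION & SPEC =====
def Spec_get_latest_day_of_each_month (days_list : List String) (out : List (String × String)) : Prop := out = get_latest_day_of_each_month_alt days_list
instance (days_list : List String) (out : List (String × String)) : Decidable (Spec_get_latest_day_of_each_month days_list out) := by unfold Spec_get_latest_day_of_each_month; infer_instance

-- ===== CLAIM (what is proved, stated in full; the proofs are below) =====
def Claim_equal_get_latest_day_of_each_month : Prop := ∀ (days_list : List String), Dom_get_latest_day_of_each_month days_list → Spec_get_latest_day_of_each_month days_list (get_latest_day_of_each_month days_list)

-- ===== LEMMAS AND PROOFS =====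

-- monotonicity of truncation in the lexicographic order
theorem take_lex {a b : List Char} (h : List.Lex (· < ·) a b) :
    ∀ n : Nat, a.take n < b.take n ∨ a.take n = b.take n := by
  induction h with
  | nil =>
    intro n
    cases n with
    | zero => right; rfl
    | succ m => left; exact List.lex_lt.mp List.Lex.nil
  | @rel a₁ l₁ a₂ l₂ hr =>
    intro n
    cases n with
    | zero => right; rfl
    | succ m => left; exact List.lex_lt.mp (List.Lex.rel hr)
  | @cons a l₁ l₂ hl ih =>
    intro n
    cases n with
    | zero => right; rfl
    | succ m =>
      rcases ih m with hlt | heq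
      · left
        exact List.lex_lt.mp (List.Lex.cons (List.lex_lt.mpr hlt))
      · right
        simp [heq]

theorem take_mono {a b : List Char} (h : a ≤ b) (n : Nat) : a.take n ≤ b.take n := by
  rcases h.lt_or_eq with hlt | heq
  · rcases take_lex (List.lex_lt.mpr hlt) n with h1 | h1
    · exact h1.le
    · exact h1.le
  · subst heq; exact le_refl _

theorem pvMonth_mono {a b : String} (h : a ≤ b) : pvMonth a ≤ pvMonth b := by
  unfold pvMonth
  rw [String.le_iff_toList_le] at h ⊢
  simp only [PySem.Str.toList_slice, PySem.Chars.slice_eq_listSlice]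
  have ea : PySem.List.slice a.toList none (some (7:Int)) = a.toList.take 7 := by simp [pysem]
  have eb : PySem.List.slice b.toList none (some (7:Int)) = b.toList.take 7 := by simp [pysem]
  rw [ea, eb]
  exact take_mono h 7

-- core invariant: from a state where the pending element p is larger than every stored key's
-- month and not larger than anything still to come, A's dict fold equals B's run-boundary fold
theorem fold_eq : ∀ (l : List String) (d : PySem.Dict String String) (p : String),
    (∀ k, d.contains k = true → k < pvMonth p) →
    (∀ x ∈ l, p ≤ x) →
    l.Pairwise (· ≤ ·) →
    l.foldl pvLoopA (d.insert (pvMonth p) p) = pvFinishB (l.foldl pvLoopB (d, some p)) := by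
  intro l
  induction l with
  | nil => intro d p _ _ _; rfl
  | cons day t ih =>
    intro d p hk hp hpw
    have hpday : p ≤ day := hp day List.mem_cons_self
    have hmle : pvMonth p ≤ pvMonth day := pvMonth_mono hpday
    have hpt : ∀ x ∈ t, day ≤ x := (List.pairwise_cons.mp hpw).1
    have hpw' : t.Pairwise (· ≤ ·) := (List.pairwise_cons.mp hpw).2
    simp only [List.foldl_cons]
    by_cases hm : pvMonth p = pvMonth day
    · -- same month: A overwrites (or keeps the equal value); B only advances prev
      have hstepA : pvLoopA (d.insert (pvMonth p) p) day = d.insert (pvMonth day) day := by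
        unfold pvLoopA
        rw [hm, PySem.Dict.get?_insert_self]
        by_cases hlt : p < day
        · simp only [hlt, if_true]
          exact PySem.Dict.insert_insert_self d (pvMonth day) p day
        · have : p = day := le_antisymm hpday (not_lt.mp hlt)
          simp [this]
      have hstepB : pvLoopB (d, some p) day = (d, some day) := by
        unfold pvLoopB; simp [hm]
      rw [hstepA, hstepB]
      exact ih d day (fun k h => hm ▸ hk k h) hpt hpw'
    · -- new month: A inserts a fresh key; B flushes prev into the result
      have hmlt : pvMonth p < pvMonth day := lt_of_le_of_ne hmle hm
      have hfresh : (d.insert (pvMonth p) p).get? (pvMonth day) = none := by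
        rw [PySem.Dict.get?_insert_of_ne _ _ (Ne.symm hm)]
        rw [PySem.Dict.get?_eq_none_iff_contains]
        cases hc : d.contains (pvMonth day) with
        | false => rfl
        | true => exact absurd (hk _ hc) (not_lt.mpr hmle)
      have hstepA : pvLoopA (d.insert (pvMonth p) p) day
          = (d.insert (pvMonth p) p).insert (pvMonth day) day := by
        unfold pvLoopA; rw [hfresh]
      have hstepB : pvLoopB (d, some p) day = (d.insert (pvMonth p) p, some day) := by
        unfold pvLoopB; simp [hm]
      rw [hstepA, hstepB]
      refine ih (d.insert (pvMonth p) p) day ?_ hpt hpw'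
      intro k h
      rw [PySem.Dict.contains_insert] at h
      rcases Bool.or_eq_true_iff.mp h with h | h
      · exact (eq_of_beq h) ▸ hmlt
      · exact lt_trans (hk k h) hmlt

theorem ports_eq (days_list : List String) :
    get_latest_day_of_each_month days_list = get_latest_day_of_each_month_alt days_list := by
  unfold get_latest_day_of_each_month get_latest_day_of_each_month_alt
  have hpw : (PySem.List.sorted days_list (fun x => x)).Pairwise (· ≤ ·) :=
    PySem.List.sorted_pairwise days_list (fun x => x)
  cases hs : PySem.List.sorted days_list (fun x => x) with
  | nil => rfl
  | cons day t =>
    rw [hs] at hpw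
    simp only [List.foldl_cons]
    have hstepA : pvLoopA PySem.Dict.empty day = PySem.Dict.empty.insert (pvMonth day) day := by
      unfold pvLoopA; rw [PySem.Dict.get?_empty]
    have hstepB : pvLoopB (PySem.Dict.empty, none) day = (PySem.Dict.empty, some day) := rfl
    rw [hstepA, hstepB]
    rw [fold_eq t PySem.Dict.empty day
      (fun k h => by rw [PySem.Dict.contains_empty] at h; exact absurd h (by simp))
      (List.pairwise_cons.mp hpw).1 (List.pairwise_cons.mp hpw).2]

-- ===== VERDICT (by name: the statement is the Claim_ definition above) =====
theorem get_latest_day_of_each_month_spec : Claim_equal_get_latest_day_of_each_month := by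
  intro days_list _
  exact ports_eq days_list
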